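-- pv_equiv track=rewrite | github.com/Bobcatsoap/jy-server | cell/RoomType13Calculator.py | is_plane_with_two_single
-- ===== SOURCE A (Python) =====
-- def is_plane(cards, three_and_dai_count, three_cards=None):
--     if 3 > three_and_dai_count > 5:
--         return False
--     # 查看牌数量是否合适
--     count = len(cards) % three_and_dai_count
--     if count > 0:
--         return False
--     plane_count = len(cards) // three_and_dai_count
--     if plane_count < 2:
--         return False
--
--     # 找顺子个数
--     card_list = []
--     for k in cards:
--         if cards.count(k) >= 3 and k not in card_list:
--             card_list.append(k)
--     if len(card_list) < plane_count:
--         return False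
--
--     def get_continues_count(distinct_cards, v):
--         # 取V开始的顺子长度
--         _count = 0
--         card_len = len(distinct_cards)
--         for i in range(card_len):
--             if v in distinct_cards:
--                 v += 1
--                 _count += 1
--                 continue
--             break
--         return _count
--
--     def get_max_continues_count(distinct_cards):
--         # 查从几开始顺子最长
--         _max_count = 0
--         max_v = 0
--         for v in distinct_cards:
--             tmp_count = get_continues_count(distinct_cards, v)
--             if tmp_count >= _max_count:
--                 _max_count = tmp_count
--                 max_v = v
--         return _max_count, max_v
--
--     # 取最大连续个数
--     max_count, start_val = get_max_continues_count(card_list)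
--     if max_count < plane_count:
--         return False
--
--     # 组织返回3张的值
--     if three_cards is not None:
--         if max_count > plane_count:
--             start_val += (max_count - plane_count)
--         for i in range(plane_count):
--             three_cards.append(start_val + i)
--     return True
--
-- def is_plane_with_two_single(cards):
--     # 3带2张单
--     # 单不能是对
--     three_cards = []
--     if is_plane(cards, 5, three_cards):
--         single_count = len(three_cards) * 2
--         # 找有几个单
--         tmp_count = 0
--         for v in cards:
--             if v not in three_cards and cards.count(v) == 1:
--                 tmp_count += 1
--         if single_count == tmp_count:
--             return True
--     return False
-- ===== SOURCE B (Python) =====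
-- from collections import Counter
--
--
-- def is_plane_with_two_single(cards):
--     # sort the triple-candidates once and look for a window of plane_count
--     # consecutive values; the three_cards bookkeeping of the original never
--     # affects the boolean result, so it is skipped entirely.
--     n = len(cards)
--     if n % 5 != 0 or n // 5 < 2:
--         return False
--     pc = n // 5
--     cnt = Counter(cards)
--     triples = sorted(v for v, c in cnt.items() if c >= 3)
--     if not any(b - a == pc - 1 for a, b in zip(triples, triples[pc - 1:])):
--         return False
--     singles = sum(1 for c in cnt.values() if c == 1)
--     return singles == 2 * pc
-- ===== Notes on version B (the rewrite author's own statement) =====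
-- stated objective: simpler
-- what changed: B replaces A's nested scans (list.count inside loops, a walk from every distinct value to find the longest consecutive run, and the three_cards bookkeeping) by one Counter pass, a single sort of the triple-candidates and one sliding-window comparison over the sorted list, counting singles from the Counter; the three_cards machinery is dropped because it never affects the boolean result.
import Mathlib
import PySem

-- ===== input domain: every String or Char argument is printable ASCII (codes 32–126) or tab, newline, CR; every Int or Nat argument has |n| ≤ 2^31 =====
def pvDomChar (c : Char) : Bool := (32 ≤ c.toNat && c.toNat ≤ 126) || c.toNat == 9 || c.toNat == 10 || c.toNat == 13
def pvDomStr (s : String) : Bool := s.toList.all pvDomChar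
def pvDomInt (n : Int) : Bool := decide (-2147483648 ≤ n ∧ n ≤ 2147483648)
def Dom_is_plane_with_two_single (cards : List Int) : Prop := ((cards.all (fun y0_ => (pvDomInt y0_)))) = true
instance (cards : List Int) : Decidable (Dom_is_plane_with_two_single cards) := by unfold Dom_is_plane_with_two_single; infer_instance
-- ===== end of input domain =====

-- B: one Counter pass + one sort + a sliding-window check over the sorted triple-candidates,
-- dropping A's three_cards bookkeeping (which never affects the boolean result).


-- ===== PORT A =====
-- inner loop of get_continues_count: 'for i in range(card_len): if v in distinct: v += 1; _count += 1; continue; break'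
def gccLoop (distinct : List Int) : Nat → Int → Int → Int
  | 0, _, c => c
  | n+1, v, c => if v ∈ distinct then gccLoop distinct n (v+1) (c+1) else c

def getContinuesCount (distinct : List Int) (v : Int) : Int :=
  gccLoop distinct distinct.length v 0

def getMaxContinuesCount (distinct : List Int) : Int × Int :=
  distinct.foldl (fun (s : Int × Int) v =>
    let tmp := getContinuesCount distinct v
    if s.1 ≤ tmp then (tmp, v) else s) (0, 0)

-- is_plane; the mutable three_cards argument is modelled by returning the (possibly extended) list
def isPlane (cards : List Int) (threeAndDaiCount : Int) (threeCards : Option (List Int)) :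
    Bool × Option (List Int) :=
  if 3 > threeAndDaiCount ∧ threeAndDaiCount > 5 then (false, threeCards)
  else
    let count := PySem.Int.mod (cards.length : Int) threeAndDaiCount
    if count > 0 then (false, threeCards)
    else
      let planeCount := PySem.Int.floordiv (cards.length : Int) threeAndDaiCount
      if planeCount < 2 then (false, threeCards)
      else
        let cardList := cards.foldl
          (fun acc k => if 3 ≤ PySem.List.count cards k ∧ k ∉ acc then acc ++ [k] else acc) []
        if (cardList.length : Int) < planeCount then (false, threeCards)
        else
          let m := getMaxContinuesCount cardList
          if m.1 < planeCount then (false, threeCards)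
          else
            match threeCards with
            | none => (true, none)
            | some tc =>
              let startVal := if m.1 > planeCount then m.2 + (m.1 - planeCount) else m.2
              (true, some (tc ++ (PySem.List.pyRange 0 planeCount 1).map (fun i => startVal + i)))

def is_plane_with_two_single (cards : List Int) : Bool :=
  let r := isPlane cards 5 (some [])
  if r.1 then
    let three := r.2.getD []
    let singleCount := (three.length : Int) * 2
    let tmpCount := cards.foldl
      (fun t v => if v ∉ three ∧ PySem.List.count cards v = 1 then t + 1 else t) (0 : Int)
    if singleCount = tmpCount then true else false
  else false

-- ===== PORT B =====
def is_plane_with_two_single_alt (cards : List Int) : Bool :=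
  let n := cards.length
  if n % 5 ≠ 0 ∨ n / 5 < 2 then false
  else
    let pc := n / 5
    let cnt := PySem.Dict.counter cards
    let triples := PySem.List.sorted
      (cnt.items.filterMap (fun p => if 3 ≤ p.2 then some p.1 else none)) (fun x => x) false
    if ¬ ((triples.zip (triples.drop (pc - 1))).any (fun p => p.2 - p.1 == (pc : Int) - 1)) then false
    else
      let singles := cnt.values.countP (fun c => c == 1)
      singles == 2 * pc



-- ===== PRECONDITION & SPEC =====
def Spec_is_plane_with_two_single (cards : List Int) (out : Bool) : Prop := out = is_plane_with_two_single_alt cards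
instance (cards : List Int) (out : Bool) : Decidable (Spec_is_plane_with_two_single cards out) := by unfold Spec_is_plane_with_two_single; infer_instance

-- ===== CLAIM (what is proved, stated in full; the proofs are below) =====
def Claim_equal_is_plane_with_two_single : Prop := ∀ (cards : List Int), Dom_is_plane_with_two_single cards → Spec_is_plane_with_two_single cards (is_plane_with_two_single cards)

-- ===== LEMMAS AND PROOFS =====


-- A's card_list building loop is ofList+filter
theorem foldl_distinct (q : Int → Prop) [DecidablePred q] (l : List Int) :
    l.foldl (fun acc k => if q k ∧ k ∉ acc then acc ++ [k] else acc) [] =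
      (PySem.Set.ofList l).filter (fun k => decide (q k)) := by
  induction l using List.reverseRecOn with
  | nil => rfl
  | append_singleton xs x ih =>
    rw [List.foldl_append, ih, PySem.Set.ofList_append_singleton,
      PySem.Set.add_eq_ite]
    by_cases hx : x ∈ PySem.Set.ofList xs
    · have hxr : x ∈ (PySem.Set.ofList xs).filter (fun k => decide (q k)) ↔ q x := by
        simp [List.mem_filter, hx]
      by_cases hq : q x
      · simp [List.foldl, hq, hxr.mpr hq, hx]
      · simp [List.foldl, hq, hx]
    · have hxr : x ∉ (PySem.Set.ofList xs).filter (fun k => decide (q k)) := by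
        intro h; exact hx (List.mem_of_mem_filter h)
      by_cases hq : q x
      · simp [List.foldl, hq, hxr, hx, List.filter_append]
      · simp [List.foldl, hq, hxr, hx, List.filter_append]

-- gccLoop accumulator
theorem gccLoop_acc (d : List Int) : ∀ (n : Nat) (v c : Int),
    gccLoop d n v c = c + gccLoop d n v 0 := by
  intro n
  induction n with
  | zero => intro v c; simp [gccLoop]
  | succ m ih =>
    intro v c
    by_cases hv : v ∈ d
    · simp only [gccLoop, if_pos hv]
      rw [ih (v+1) (c+1), ih (v+1) (0+1)]; ring
    · simp [gccLoop, hv]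

theorem gccLoop_le (d : List Int) : ∀ (n : Nat) (v : Int), gccLoop d n v 0 ≤ (n : Int) := by
  intro n
  induction n with
  | zero => intro v; simp [gccLoop]
  | succ m ih =>
    intro v
    by_cases hv : v ∈ d
    · simp only [gccLoop, if_pos hv]
      rw [gccLoop_acc d m (v+1) (0+1)]
      have := ih (v+1); push_cast; omega
    · simp only [gccLoop, if_neg hv]; positivity

theorem gccLoop_nonneg' (d : List Int) : ∀ (n : Nat) (v : Int), 0 ≤ gccLoop d n v 0 := by
  intro n
  induction n with
  | zero => intro v; simp [gccLoop]
  | succ m ih =>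
    intro v
    by_cases hv : v ∈ d
    · simp only [gccLoop, if_pos hv]
      rw [gccLoop_acc d m (v+1) (0+1)]
      have := ih (v+1); omega
    · simp [gccLoop, hv]

theorem gccLoop_ge_of_run (d : List Int) : ∀ (k : Nat) (n : Nat) (v : Int), k ≤ n →
    (∀ j : Nat, j < k → v + j ∈ d) → (k : Int) ≤ gccLoop d n v 0 := by
  intro k
  induction k with
  | zero => intro n v _ _; have := gccLoop_nonneg' d n v; omega
  | succ m ih =>
    intro n v hkn hrun
    obtain ⟨n', rfl⟩ : ∃ n', n = n' + 1 := ⟨n - 1, by omega⟩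
    have hv : v ∈ d := by have := hrun 0 (by omega); simpa using this
    simp only [gccLoop, if_pos hv]
    rw [gccLoop_acc d n' (v+1) (0+1)]
    have := ih n' (v+1) (by omega) (fun j hj => by
      have h2 := hrun (j+1) (by omega)
      rwa [show v + ((j:Nat)+1 : Nat) = v + 1 + (j:Nat) by push_cast; ring] at h2)
    push_cast; omega

theorem run_of_gccLoop_ge (d : List Int) : ∀ (k : Nat) (n : Nat) (v : Int),
    (k : Int) ≤ gccLoop d n v 0 → (∀ j : Nat, j < k → v + j ∈ d) := by
  intro k
  induction k with
  | zero => intro n v _ j hj; omega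
  | succ m ih =>
    intro n v hge j hj
    obtain ⟨n', rfl⟩ : ∃ n', n = n' + 1 := by
      rcases n with _ | n'
      · exfalso; simp [gccLoop] at hge; omega
      · exact ⟨n', rfl⟩
    by_cases hv : v ∈ d
    · simp only [gccLoop, if_pos hv] at hge
      rw [gccLoop_acc d n' (v+1) (0+1)] at hge
      have hih := ih n' (v+1) (by push_cast at hge ⊢; omega)
      rcases j with _ | j'
      · simpa using hv
      · have h2 := hih j' (by omega)
        rwa [show v + 1 + (j':Nat) = v + ((j'+1 : Nat):Int) by push_cast; ring] at h2
    · simp only [gccLoop, if_neg hv] at hge; push_cast at hge; omega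


-- fold of getMaxContinuesCount: invariants
theorem gmccFold_cases (d : List Int) : ∀ (l : List Int) (s0 : Int × Int),
    (l.foldl (fun (s : Int × Int) v =>
      let tmp := getContinuesCount d v
      if s.1 ≤ tmp then (tmp, v) else s) s0) = s0 ∨
    ((l.foldl (fun (s : Int × Int) v =>
      let tmp := getContinuesCount d v
      if s.1 ≤ tmp then (tmp, v) else s) s0).2 ∈ l ∧
     (l.foldl (fun (s : Int × Int) v =>
      let tmp := getContinuesCount d v
      if s.1 ≤ tmp then (tmp, v) else s) s0).1 =
        getContinuesCount d (l.foldl (fun (s : Int × Int) v =>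
      let tmp := getContinuesCount d v
      if s.1 ≤ tmp then (tmp, v) else s) s0).2) := by
  intro l
  induction l with
  | nil => intro s0; left; rfl
  | cons x xs ih =>
    intro s0
    simp only [List.foldl_cons]
    rcases ih (if s0.1 ≤ getContinuesCount d x then (getContinuesCount d x, x) else s0) with h | h
    · rw [h]
      by_cases hc : s0.1 ≤ getContinuesCount d x
      · right; simp [hc]
      · left; simp [hc]
    · right
      exact ⟨List.mem_cons_of_mem x h.1, h.2⟩

theorem gmccFold_ge (d : List Int) : ∀ (l : List Int) (s0 : Int × Int) (v : Int), v ∈ l →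
    getContinuesCount d v ≤ (l.foldl (fun (s : Int × Int) v =>
      let tmp := getContinuesCount d v
      if s.1 ≤ tmp then (tmp, v) else s) s0).1 := by
  intro l
  induction l with
  | nil => intro s0 v hv; cases hv
  | cons x xs ih =>
    intro s0 v hv
    simp only [List.foldl_cons]
    rcases List.mem_cons.mp hv with rfl | hv'
    · -- v = x : fold's first component only grows
      have grow : ∀ (l' : List Int) (s : Int × Int), s.1 ≤ (l'.foldl (fun (s : Int × Int) v =>
          let tmp := getContinuesCount d v
          if s.1 ≤ tmp then (tmp, v) else s) s).1 := by
        intro l'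
        induction l' with
        | nil => intro s; exact le_refl _
        | cons y ys ihy =>
          intro s
          simp only [List.foldl_cons]
          refine le_trans ?_ (ihy ((fun (s : Int × Int) w =>
            let tmp := getContinuesCount d w
            if s.1 ≤ tmp then (tmp, w) else s) s y))
          by_cases hc : s.1 ≤ getContinuesCount d y
          · simp [hc]
          · simp [hc]
      refine le_trans ?_ (grow xs ((fun (s : Int × Int) w =>
        let tmp := getContinuesCount d w
        if s.1 ≤ tmp then (tmp, w) else s) s0 v))
      show getContinuesCount d v ≤ ((fun (s : Int × Int) w =>
        let tmp := getContinuesCount d w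
        if s.1 ≤ tmp then (tmp, w) else s) s0 v).1
      by_cases hc : s0.1 ≤ getContinuesCount d v
      · simp [hc]
      · simp only []
        rw [if_neg hc]
        exact le_of_lt (lt_of_not_ge hc)
    · exact ih _ v hv'

-- index congruence for getElem (used to move between equal index expressions)
theorem getElem_idx_congr (l : List Int) (i j : Nat) (h : i = j) (hj : j < l.length) :
    l[i]'(by omega) = l[j]'hj := by subst h; rfl

-- strictly increasing list: gap between positions
theorem pairwise_lt_getElem_le (l : List Int) (h : l.Pairwise (· < ·)) :
    ∀ (j i : Nat) (hj : j < l.length) (hij : i ≤ j),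
      l[i]'(by omega) + ((j - i : Nat) : Int) ≤ l[j]'hj := by
  intro j
  induction j with
  | zero => intro i hj hij; interval_cases i; simp
  | succ m ihm =>
    intro i hj hij
    rcases Nat.eq_or_lt_of_le hij with rfl | hlt
    · simp
    · have h1 := ihm i (by omega) (by omega)
      have h2 : l[m]'(by omega) < l[m+1]'hj :=
        List.pairwise_iff_getElem.mp h m (m+1) (by omega) hj (by omega)
      have he : ((m+1) - i : Nat) = ((m - i : Nat)) + 1 := by omega
      rw [he]; push_cast; omega

theorem idxOf_mono_of_pairwise_lt (l : List Int) (h : l.Pairwise (· < ·))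
    (x y : Int) (hx : x ∈ l) (hy : y ∈ l) (hxy : x < y) :
    List.idxOf x l < List.idxOf y l := by
  have hxl := List.idxOf_lt_length_of_mem hx
  have hyl := List.idxOf_lt_length_of_mem hy
  by_contra hc
  push_neg at hc
  rcases lt_or_eq_of_le hc with hlt | heq
  · have := List.pairwise_iff_getElem.mp h _ _ hyl hxl hlt
    rw [List.getElem_idxOf, List.getElem_idxOf] at this
    omega
  · have h2 : l[List.idxOf x l]'hxl = l[List.idxOf y l]'hyl := getElem_idx_congr l _ _ (by omega) hyl
    rw [List.getElem_idxOf, List.getElem_idxOf] at h2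
    omega

-- window of span k at position i  →  a run of k+1 consecutive values
theorem run_of_window (l : List Int) (h : l.Pairwise (· < ·)) (k : Nat)
    (i : Nat) (hik : i + k < l.length) (hw : l[i+k]'hik = l[i]'(by omega) + (k : Int)) :
    ∀ j : Nat, j ≤ k → l[i]'(by omega) + (j : Int) ∈ l := by
  intro j hj
  have h1 := pairwise_lt_getElem_le l h (i+j) i (by omega) (by omega)
  have h2 := pairwise_lt_getElem_le l h (i+k) (i+j) hik (by omega)
  rw [show ((i+j) - i : Nat) = j from by omega] at h1
  rw [show ((i+k) - (i+j) : Nat) = k - j from by omega] at h2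
  have hkey : l[i+j]'(by omega) = l[i]'(by omega) + (j : Int) := by
    rw [hw] at h2
    have hc : ((k - j : Nat) : Int) = (k : Int) - (j : Int) := by push_cast; omega
    rw [hc] at h2; omega
  rw [← hkey]
  exact List.getElem_mem _

-- a run of k+1 consecutive values  →  window of span k
theorem window_of_run (l : List Int) (h : l.Pairwise (· < ·)) (k : Nat) (a : Int)
    (hr : ∀ j : Nat, j ≤ k → a + (j : Int) ∈ l) :
    ∃ i : Nat, ∃ hik : i + k < l.length, l[i+k]'hik = l[i]'(by omega) + (k : Int) := by
  have hmono : ∀ j : Nat, j ≤ k → List.idxOf a l + j ≤ List.idxOf (a + (j:Int)) l := by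
    intro j
    induction j with
    | zero => intro _; simp
    | succ m ihm =>
      intro hm1
      have h1 := ihm (by omega)
      have h2 := idxOf_mono_of_pairwise_lt l h (a + (m:Int)) (a + ((m+1:Nat):Int))
        (hr m (by omega)) (hr (m+1) hm1) (by push_cast; omega)
      omega
  have hak : a + (k:Int) ∈ l := hr k (le_refl _)
  have ha : a ∈ l := by have := hr 0 (by omega); simpa using this
  have hkl := List.idxOf_lt_length_of_mem hak
  have hal := List.idxOf_lt_length_of_mem ha
  have hub := hmono k (le_refl _)
  have hgap := pairwise_lt_getElem_le l h (List.idxOf (a + (k:Int)) l) (List.idxOf a l) hkl (by omega)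
  rw [List.getElem_idxOf, List.getElem_idxOf] at hgap
  have heq : List.idxOf (a + (k:Int)) l = List.idxOf a l + k := by
    have hc : ((List.idxOf (a + (k:Int)) l - List.idxOf a l : Nat) : Int)
        = (List.idxOf (a + (k:Int)) l : Int) - (List.idxOf a l : Int) := by push_cast; omega
    rw [hc] at hgap; omega
  refine ⟨List.idxOf a l, by omega, ?_⟩
  have h3 : l[List.idxOf a l + k]'(by omega) = l[List.idxOf (a + (k:Int)) l]'hkl :=
    getElem_idx_congr l _ _ (by omega) hkl
  rw [h3, List.getElem_idxOf, List.getElem_idxOf]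

-- the zip-window test of B, characterised by indices
theorem zip_drop_any_iff (l : List Int) (k : Nat) (c : Int) :
    ((l.zip (l.drop k)).any (fun p => p.2 - p.1 == c)) = true ↔
      ∃ i : Nat, ∃ hik : i + k < l.length, l[i+k]'hik = l[i]'(by omega) + c := by
  rw [List.any_eq_true]
  constructor
  · rintro ⟨p, hp, hpc⟩
    obtain ⟨i, hi, hpi⟩ := List.mem_iff_getElem.mp hp
    have hlen : i + k < l.length := by
      have h4 := hi; simp [List.length_zip, List.length_drop] at h4; omega
    refine ⟨i, hlen, ?_⟩
    have hp2 : p = (l[i]'(by omega), l[i+k]'hlen) := by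
      rw [← hpi]; rw [List.getElem_zip]
      refine Prod.ext rfl ?_
      simp only [List.getElem_drop]
      exact getElem_idx_congr l _ _ (by omega) hlen
    rw [hp2] at hpc
    simp at hpc
    omega
  · rintro ⟨i, hik, hw⟩
    have hzl : i < (l.zip (l.drop k)).length := by
      simp [List.length_zip, List.length_drop]; omega
    refine ⟨(l.zip (l.drop k))[i]'hzl, List.getElem_mem _, ?_⟩
    simp only [List.getElem_zip, List.getElem_drop]
    have h3 : l[k+i]'(by omega) = l[i+k]'hik := getElem_idx_congr l _ _ (by omega) hik
    rw [h3, hw]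
    simp


theorem filterMap_guard (l : List Int) (p : Int → Bool) :
    l.filterMap (fun k => if p k then some k else none) = l.filter p := by
  induction l with
  | nil => rfl
  | cons x xs ih =>
    by_cases hx : p x <;> simp [List.filterMap_cons, List.filter_cons, hx, ih]

theorem filter_ofList_of_count_le_one (l : List Int) (q : Int → Bool)
    (h : ∀ v, q v = true → List.count v l ≤ 1) :
    l.filter q = (PySem.Set.ofList l).filter q := by
  induction l using List.reverseRecOn with
  | nil => rfl
  | append_singleton xs x ih =>
    have h' : ∀ v, q v = true → List.count v xs ≤ 1 := by
      intro v hv; have := h v hv; rw [List.count_append] at this; omega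
    rw [PySem.Set.ofList_append_singleton, PySem.Set.add_eq_ite]
    by_cases hx : x ∈ PySem.Set.ofList xs
    · have hxs : x ∈ xs := (PySem.Set.mem_ofList xs x).mp hx
      have hqx : q x = false := by
        rcases Bool.eq_false_or_eq_true (q x) with hq | hq
        · exfalso
          have hcnt := h x hq
          rw [List.count_append] at hcnt
          have h1 : 1 ≤ List.count x xs := List.one_le_count_iff.mpr hxs
          have h2 : List.count x [x] = 1 := by simp
          omega
        · exact hq
      simp [hx, List.filter_append, hqx, ih h']
    · simp [hx, List.filter_append, ih h']

-- A's card_list, in closed form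
def cardListOf (cards : List Int) : List Int :=
  (PySem.Set.ofList cards).filter (fun k => decide (3 ≤ PySem.List.count cards k))

theorem mem_cardListOf (cards : List Int) (x : Int) :
    x ∈ cardListOf cards ↔ x ∈ cards ∧ 3 ≤ PySem.List.count cards x := by
  simp [cardListOf, List.mem_filter, PySem.Set.mem_ofList]

theorem nodup_cardListOf (cards : List Int) : (cardListOf cards).Nodup :=
  (PySem.Set.nodup_ofList cards).filter _

theorem mod_five_cast (n : Nat) : PySem.Int.mod (n:Int) 5 = ((n % 5 : Nat) : Int) := by
  simp [PySem.Int.mod, Int.fmod_eq_emod]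

theorem div_five_cast (n : Nat) : PySem.Int.floordiv (n:Int) 5 = ((n / 5 : Nat) : Int) := by
  simp [PySem.Int.floordiv, Int.fdiv_eq_ediv]

theorem isPlane_five (cards : List Int) :
    isPlane cards 5 (some []) =
      (if ((cards.length % 5 : Nat) : Int) > 0 then (false, some [])
       else if ((cards.length / 5 : Nat) : Int) < 2 then (false, some [])
       else if ((cardListOf cards).length : Int) < ((cards.length / 5 : Nat) : Int) then (false, some [])
       else if (getMaxContinuesCount (cardListOf cards)).1 < ((cards.length / 5 : Nat) : Int) then (false, some [])
       else (true, some (List.map (fun i =>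
          (if (getMaxContinuesCount (cardListOf cards)).1 > ((cards.length / 5 : Nat) : Int)
           then (getMaxContinuesCount (cardListOf cards)).2 +
                ((getMaxContinuesCount (cardListOf cards)).1 - ((cards.length / 5 : Nat) : Int))
           else (getMaxContinuesCount (cardListOf cards)).2) + i)
         (PySem.List.pyRange 0 ((cards.length / 5 : Nat) : Int) 1)))) := by
  have hfold : cards.foldl
      (fun acc k => if 3 ≤ PySem.List.count cards k ∧ k ∉ acc then acc ++ [k] else acc) [] =
      cardListOf cards := foldl_distinct (fun k => 3 ≤ PySem.List.count cards k) cards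
  simp only [isPlane, mod_five_cast, div_five_cast, hfold]
  norm_num

-- B's triple-candidate generator, before sorting, is exactly A's card_list
theorem triples_pre (cards : List Int) :
    ((PySem.Dict.counter cards).items.filterMap
      (fun p => if 3 ≤ p.2 then some p.1 else none)) = cardListOf cards := by
  rw [PySem.Dict.items_counter, List.filterMap_map]
  have h1 : ∀ k ∈ PySem.Set.ofList cards,
      ((fun p : Int × Int => if 3 ≤ p.2 then some p.1 else none) ∘
        (fun k => (k, (List.count k cards : Int)))) k
      = (if (decide (3 ≤ PySem.List.count cards k) : Bool) then some k else none) := by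
    intro k _
    simp only [Function.comp]
    by_cases h : 3 ≤ List.count k cards
    · rw [if_pos (by exact_mod_cast h), if_pos (by simp [PySem.List.count_eq, h])]
    · rw [if_neg (by exact_mod_cast h), if_neg (by simp [PySem.List.count_eq, h])]
  rw [List.filterMap_congr h1, filterMap_guard]
  rfl

-- B's singles count from the Counter's values
theorem values_singles (cards : List Int) :
    (PySem.Dict.counter cards).values.countP (fun c => c == 1)
      = (PySem.Set.ofList cards).countP (fun k => decide (PySem.List.count cards k = 1)) := by
  simp only [PySem.Dict.values, PySem.Dict.items_counter, List.map_map, List.countP_map]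
  apply List.countP_congr
  intro k _
  simp only [Function.comp]
  by_cases h : List.count k cards = 1
  · simp [h, PySem.List.count_eq]
  · have hc : ¬ ((List.count k cards : Int) = 1) := by exact_mod_cast h
    simp [PySem.List.count_eq, h, hc]

-- the sorted triples list
def sortedCL (cards : List Int) : List Int :=
  PySem.List.sorted (cardListOf cards) (fun x => x) false

theorem sortedCL_pairwise_lt (cards : List Int) : (sortedCL cards).Pairwise (· < ·) := by
  have h1 : (sortedCL cards).Pairwise (fun a b => a ≤ b) :=
    PySem.List.sorted_pairwise (cardListOf cards) (fun x => x)
  have h2 : (sortedCL cards).Nodup :=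
    (PySem.List.sorted_perm (cardListOf cards) (fun x => x) false).symm.nodup
      (nodup_cardListOf cards)
  exact (h1.and h2).imp (fun h => lt_of_le_of_ne h.1 h.2)

theorem mem_sortedCL (cards : List Int) (x : Int) :
    x ∈ sortedCL cards ↔ x ∈ cardListOf cards :=
  PySem.List.mem_sorted (cardListOf cards) (fun x => x) false x

-- B's window test over the sorted triples, characterised as a consecutive run in card_list
theorem window_iff_run (cards : List Int) (kk : Nat) :
    (((sortedCL cards).zip ((sortedCL cards).drop kk)).any
        (fun p => p.2 - p.1 == (kk : Int))) = true ↔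
      ∃ a : Int, ∀ j : Nat, j ≤ kk → a + (j : Int) ∈ cardListOf cards := by
  rw [zip_drop_any_iff]
  constructor
  · rintro ⟨i, hik, hw⟩
    refine ⟨(sortedCL cards)[i]'(by omega), fun j hj => ?_⟩
    have := run_of_window (sortedCL cards) (sortedCL_pairwise_lt cards) kk i hik hw j hj
    exact (mem_sortedCL cards _).mp this
  · rintro ⟨a, hr⟩
    exact window_of_run (sortedCL cards) (sortedCL_pairwise_lt cards) kk a
      (fun j hj => (mem_sortedCL cards _).mpr (hr j hj))

-- A's max-continues gate, characterised the same way (needs pc ≤ |card_list|, pc ≥ 1)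
theorem mc_ge_iff_run (cards : List Int) (pc : Nat) (hpc : 1 ≤ pc)
    (hlen : pc ≤ (cardListOf cards).length) :
    ((pc : Int) ≤ (getMaxContinuesCount (cardListOf cards)).1 ↔
      ∃ a : Int, ∀ j : Nat, j < pc → a + (j : Int) ∈ cardListOf cards) := by
  constructor
  · intro hge
    rcases gmccFold_cases (cardListOf cards) (cardListOf cards) (0, 0) with h | h
    · exfalso
      have : (getMaxContinuesCount (cardListOf cards)).1 = 0 := by
        unfold getMaxContinuesCount; rw [h]
      omega
    · refine ⟨(getMaxContinuesCount (cardListOf cards)).2, fun j hj => ?_⟩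
      have h2 : (pc : Int) ≤ getContinuesCount (cardListOf cards)
          (getMaxContinuesCount (cardListOf cards)).2 := by
        have := h.2; unfold getMaxContinuesCount at *; omega
      exact run_of_gccLoop_ge (cardListOf cards) pc (cardListOf cards).length
        (getMaxContinuesCount (cardListOf cards)).2 h2 j hj
  · rintro ⟨a, hr⟩
    have ha : a ∈ cardListOf cards := by have := hr 0 (by omega); simpa using this
    have h1 : (pc : Int) ≤ getContinuesCount (cardListOf cards) a :=
      gccLoop_ge_of_run (cardListOf cards) pc (cardListOf cards).length a hlen hr
    have h2 := gmccFold_ge (cardListOf cards) (cardListOf cards) (0, 0) a ha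
    unfold getMaxContinuesCount
    omega

theorem gmcc_spec (cards : List Int) (hmc : 2 ≤ (getMaxContinuesCount (cardListOf cards)).1) :
    (getMaxContinuesCount (cardListOf cards)).2 ∈ cardListOf cards ∧
    (getMaxContinuesCount (cardListOf cards)).1 =
      getContinuesCount (cardListOf cards) (getMaxContinuesCount (cardListOf cards)).2 := by
  rcases gmccFold_cases (cardListOf cards) (cardListOf cards) (0, 0) with h | h
  · exfalso
    have h0 : (getMaxContinuesCount (cardListOf cards)).1 = 0 := by
      unfold getMaxContinuesCount; rw [h]
    omega
  · unfold getMaxContinuesCount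
    exact h

-- every value written into three_cards is a triple candidate
theorem three_subset (cards : List Int) (pcI : Int) (hpc2 : 2 ≤ pcI)
    (hmc : pcI ≤ (getMaxContinuesCount (cardListOf cards)).1) :
    ∀ x ∈ List.map (fun i =>
        (if (getMaxContinuesCount (cardListOf cards)).1 > pcI
         then (getMaxContinuesCount (cardListOf cards)).2 +
              ((getMaxContinuesCount (cardListOf cards)).1 - pcI)
         else (getMaxContinuesCount (cardListOf cards)).2) + i)
      (PySem.List.pyRange 0 pcI 1), x ∈ cardListOf cards := by
  intro x hx
  obtain ⟨i, hi, rfl⟩ := List.mem_map.mp hx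
  have hi' : 0 ≤ i ∧ i < pcI := PySem.List.mem_pyRange_one.mp hi
  obtain ⟨hm2, hmceq⟩ := gmcc_spec cards (by omega)
  have hle : getContinuesCount (cardListOf cards) (getMaxContinuesCount (cardListOf cards)).2
      ≤ ((cardListOf cards).length : Int) :=
    gccLoop_le (cardListOf cards) (cardListOf cards).length _
  have hrunmax : ∀ j : Nat, j < (getMaxContinuesCount (cardListOf cards)).1.toNat →
      (getMaxContinuesCount (cardListOf cards)).2 + (j : Int) ∈ cardListOf cards := by
    apply run_of_gccLoop_ge (cardListOf cards) _ (cardListOf cards).length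
    show ((getMaxContinuesCount (cardListOf cards)).1.toNat : Int) ≤
      getContinuesCount (cardListOf cards) (getMaxContinuesCount (cardListOf cards)).2
    rw [← hmceq]
    omega
  set mc := (getMaxContinuesCount (cardListOf cards)).1 with hmcdef
  set mv := (getMaxContinuesCount (cardListOf cards)).2 with hmvdef
  have hcore : ∀ off : Int, 0 ≤ off → off + i < mc →
      mv + off + i ∈ cardListOf cards := by
    intro off hoff hlt
    have hj : ((off + i).toNat : Int) = off + i := by omega
    have := hrunmax (off + i).toNat (by omega)
    rw [hj] at this
    rw [show mv + off + i = mv + (off + i) from by ring]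
    exact this
  by_cases hgt : mc > pcI
  · rw [if_pos hgt]
    have := hcore (mc - pcI) (by omega) (by omega)
    rw [show mv + (mc - pcI) + i = mv + (mc - pcI) + i from rfl]
    exact this
  · rw [if_neg hgt]
    have := hcore 0 (by omega) (by omega)
    rw [show mv + i = mv + 0 + i from by ring]
    exact this

theorem a_eq_b (cards : List Int) :
    is_plane_with_two_single cards = is_plane_with_two_single_alt cards := by
  by_cases h5 : cards.length % 5 = 0
  case neg =>
    have hA : is_plane_with_two_single cards = false := by
      simp only [is_plane_with_two_single, isPlane_five]
      rw [if_pos (by omega : ((cards.length % 5 : Nat) : Int) > 0)]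
      simp
    have hB : is_plane_with_two_single_alt cards = false := by
      simp only [is_plane_with_two_single_alt]
      rw [if_pos (by omega : cards.length % 5 ≠ 0 ∨ cards.length / 5 < 2)]
    rw [hA, hB]
  case pos =>
    by_cases hpc : cards.length / 5 < 2
    · have hA : is_plane_with_two_single cards = false := by
        simp only [is_plane_with_two_single, isPlane_five]
        rw [if_neg (by omega : ¬ ((cards.length % 5 : Nat) : Int) > 0),
          if_pos (by omega : ((cards.length / 5 : Nat) : Int) < 2)]
        simp
      have hB : is_plane_with_two_single_alt cards = false := by
        simp only [is_plane_with_two_single_alt]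
        rw [if_pos (by omega : cards.length % 5 ≠ 0 ∨ cards.length / 5 < 2)]
      rw [hA, hB]
    · have hsfold : PySem.List.sorted (cardListOf cards) (fun x => x) false = sortedCL cards := rfl
      have hck : ((cards.length / 5 : Nat) : Int) - 1 = ((cards.length / 5 - 1 : Nat) : Int) := by
        omega
      by_cases hlen : (cardListOf cards).length < cards.length / 5
      · have hA : is_plane_with_two_single cards = false := by
          simp only [is_plane_with_two_single, isPlane_five]
          rw [if_neg (by omega : ¬ ((cards.length % 5 : Nat) : Int) > 0),
            if_neg (by omega : ¬ ((cards.length / 5 : Nat) : Int) < 2),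
            if_pos (by omega : ((cardListOf cards).length : Int) < ((cards.length / 5 : Nat) : Int))]
          simp
        have hB : is_plane_with_two_single_alt cards = false := by
          simp only [is_plane_with_two_single_alt]
          rw [if_neg (by omega : ¬ (cards.length % 5 ≠ 0 ∨ cards.length / 5 < 2)),
            triples_pre, hck, hsfold]
          rw [if_pos]
          intro hany
          obtain ⟨i, hik, -⟩ := (zip_drop_any_iff (sortedCL cards) (cards.length / 5 - 1) _).mp hany
          have hL : (sortedCL cards).length = (cardListOf cards).length :=
            PySem.List.length_sorted _ _ _
          omega
        rw [hA, hB]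
      · -- the deep case: enough triple candidates
        have hpc1 : 1 ≤ cards.length / 5 := by omega
        have hlenN : cards.length / 5 ≤ (cardListOf cards).length := by omega
        have hmciff := mc_ge_iff_run cards (cards.length / 5) hpc1 hlenN
        have hwiff := window_iff_run cards (cards.length / 5 - 1)
        have hree : (∃ a : Int, ∀ j : Nat, j ≤ cards.length / 5 - 1 →
              a + (j : Int) ∈ cardListOf cards) ↔
            (∃ a : Int, ∀ j : Nat, j < cards.length / 5 →
              a + (j : Int) ∈ cardListOf cards) := by
          constructor <;> rintro ⟨a, h⟩ <;> exact ⟨a, fun j hj => h j (by omega)⟩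
        by_cases hmc : ((cards.length / 5 : Nat) : Int) ≤ (getMaxContinuesCount (cardListOf cards)).1
        · -- both sides reduce to the singles comparison
          simp only [is_plane_with_two_single, isPlane_five]
          rw [if_neg (by omega : ¬ ((cards.length % 5 : Nat) : Int) > 0),
            if_neg (by omega : ¬ ((cards.length / 5 : Nat) : Int) < 2),
            if_neg (by omega : ¬ ((cardListOf cards).length : Int) < ((cards.length / 5 : Nat) : Int)),
            if_neg (by omega : ¬ (getMaxContinuesCount (cardListOf cards)).1 < ((cards.length / 5 : Nat) : Int))]
          simp only [is_plane_with_two_single_alt]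
          rw [if_neg (by omega : ¬ (cards.length % 5 ≠ 0 ∨ cards.length / 5 < 2)),
            triples_pre, hck, hsfold]
          rw [if_neg (not_not_intro (hwiff.mpr (hree.mpr (hmciff.mp hmc))))]
          simp only [if_true]
          set T3 := List.map (fun i =>
              (if (getMaxContinuesCount (cardListOf cards)).1 > ((cards.length / 5 : Nat) : Int) then
                  (getMaxContinuesCount (cardListOf cards)).2 +
                    ((getMaxContinuesCount (cardListOf cards)).1 - ((cards.length / 5 : Nat) : Int))
                else (getMaxContinuesCount (cardListOf cards)).2) + i)
            (PySem.List.pyRange 0 ((cards.length / 5 : Nat) : Int) 1) with hT3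
          show (if ((T3.length : Nat) : Int) * 2 =
                List.foldl (fun t v => if v ∉ T3 ∧ PySem.List.count cards v = 1 then t + 1 else t)
                  0 cards then true else false)
              = (List.countP (fun c => c == 1) (PySem.Dict.counter cards).values
                  == 2 * (cards.length / 5))
          have h3sub := three_subset cards ((cards.length / 5 : Nat) : Int) (by omega) hmc
          rw [← hT3] at h3sub
          have hlen3 : T3.length = cards.length / 5 := by
            rw [hT3, List.length_map, PySem.List.length_pyRange_one]; omega
          have hfoldc : ∀ (l : List Int) (a : Int),
              List.foldl (fun t v => if v ∉ T3 ∧ PySem.List.count cards v = 1 then t + 1 else t) a l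
                = a + (List.countP (fun v => decide (v ∉ T3 ∧ PySem.List.count cards v = 1)) l : Int) := by
            intro l
            induction l with
            | nil => intro a; simp
            | cons x xs ihx =>
              intro a
              by_cases hx : x ∉ T3 ∧ PySem.List.count cards x = 1
              · simp only [List.foldl_cons, List.countP_cons, if_pos hx, decide_eq_true hx]
                rw [ihx]; push_cast; ring
              · simp only [List.foldl_cons, List.countP_cons, if_neg hx,
                  decide_eq_false hx]
                rw [ihx]; push_cast; ring
          rw [hfoldc cards 0]
          have hnoop : List.countP (fun v => decide (v ∉ T3 ∧ PySem.List.count cards v = 1)) cards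
              = List.countP (fun v => decide (PySem.List.count cards v = 1)) cards := by
            apply List.countP_congr
            intro v hv
            simp only [decide_eq_true_eq]
            constructor
            · exact fun h => h.2
            · intro hc
              refine ⟨fun hmem => ?_, hc⟩
              have := (mem_cardListOf cards v).mp (h3sub v hmem)
              omega
          have hsee : List.countP (fun v => decide (PySem.List.count cards v = 1)) cards
              = List.countP (fun v => decide (PySem.List.count cards v = 1)) (PySem.Set.ofList cards) := by
            rw [List.countP_eq_length_filter, List.countP_eq_length_filter,
              filter_ofList_of_count_le_one]
            intro v hv
            rw [decide_eq_true_eq] at hv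
            rw [← PySem.List.count_eq]
            omega
          rw [hnoop, hsee, values_singles, hlen3]
          by_cases hs : List.countP (fun v => decide (PySem.List.count cards v = 1))
              (PySem.Set.ofList cards) = 2 * (cards.length / 5)
          · rw [if_pos (by omega), hs]
            simp
          · rw [if_neg (by omega)]
            symm
            rw [beq_eq_false_iff_ne]
            exact hs
        · have hA : is_plane_with_two_single cards = false := by
            simp only [is_plane_with_two_single, isPlane_five]
            rw [if_neg (by omega : ¬ ((cards.length % 5 : Nat) : Int) > 0),
              if_neg (by omega : ¬ ((cards.length / 5 : Nat) : Int) < 2),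
              if_neg (by omega : ¬ ((cardListOf cards).length : Int) < ((cards.length / 5 : Nat) : Int)),
              if_pos (by omega : (getMaxContinuesCount (cardListOf cards)).1 < ((cards.length / 5 : Nat) : Int))]
            simp
          have hB : is_plane_with_two_single_alt cards = false := by
            simp only [is_plane_with_two_single_alt]
            rw [if_neg (by omega : ¬ (cards.length % 5 ≠ 0 ∨ cards.length / 5 < 2)),
              triples_pre, hck, hsfold]
            rw [if_pos]
            intro hany
            exact absurd (hmciff.mpr (hree.mp (hwiff.mp hany))) hmc
          rw [hA, hB]

-- ===== VERDICT (by name: the statement is the Claim_ definition above) =====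
theorem is_plane_with_two_single_spec : Claim_equal_is_plane_with_two_single := by
  intro cards _
  unfold Spec_is_plane_with_two_single
  exact a_eq_b cards
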